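-- pv_equiv track=rewrite | github.com/MorenaSandroni/Tps-TDA-2024 | tp3/generar_txt_prop.py | generar_subgrupos_iguales
-- ===== SOURCE A (Python) =====
-- def generar_subgrupos_iguales(n, g):
--     def generar_particiones_util(total_sum, n, g, start, actual):
--         if g == 0:
--             return [[]] if total_sum == 0 else []
--
--         particiones = []
--         for i in range(start, min(700, total_sum // g) + 1):
--             if i <= actual:
--                 for particion in generar_particiones_util(total_sum - i, n, g - 1, i, actual):
--                     particiones.append([i] + particion)
--
--         return particiones
--
--     total_sum = sum(range(1, n + 1)) * g // n
--     return generar_particiones_util(total_sum, n, g, 1, 700)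
-- ===== SOURCE B (Python) =====
-- def generar_subgrupos_iguales(n, g):
--     total_sum = sum(range(1, n + 1)) * g // n
--     # breadth-first: expand all partial prefixes one part at a time
--     states = [(total_sum, 1, [])]   # (remaining sum, minimum next part, prefix)
--     k = g
--     while k > 0 and states:
--         states = [(rem - i, i, pref + [i])
--                   for (rem, lo, pref) in states
--                   for i in range(lo, min(700, rem // k) + 1)]
--         k -= 1
--     return [pref for (rem, lo, pref) in states if rem == 0]
-- ===== Notes on version B (the rewrite author's own statement) =====
-- stated objective: alternative
-- what changed: A enumerates the equal-sum partitions by depth-first recursion on the number of parts; B runs a breadth-first level loop that expands every partial prefix by one part per round (a list comprehension over a worklist of (remaining, minimum, prefix) states) and filters the finished prefixes at the end, producing the same partitions in the same order.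
-- outside the precondition, e.g. on generar_subgrupos_iguales(-3, -2): A returns [], B returns [[]]
import Mathlib
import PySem

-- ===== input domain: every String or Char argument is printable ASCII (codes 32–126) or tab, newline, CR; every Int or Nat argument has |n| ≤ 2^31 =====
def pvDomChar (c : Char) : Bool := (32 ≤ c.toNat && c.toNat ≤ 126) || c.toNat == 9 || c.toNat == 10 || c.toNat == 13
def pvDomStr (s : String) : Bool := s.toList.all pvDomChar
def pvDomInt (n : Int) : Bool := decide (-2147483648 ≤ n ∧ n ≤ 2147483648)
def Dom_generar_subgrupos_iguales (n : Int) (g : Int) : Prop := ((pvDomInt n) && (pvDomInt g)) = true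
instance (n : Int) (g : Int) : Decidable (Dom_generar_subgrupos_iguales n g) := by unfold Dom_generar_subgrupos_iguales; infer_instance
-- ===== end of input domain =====

-- B replaces A's depth-first recursion with a breadth-first level loop (expand every partial
-- prefix by one part per round, filter the finished ones at the end); same values in the same
-- order, no speed claim.

-- ===== PORT A =====
-- literal port of generar_particiones_util; the Nat fuel (g.toNat + 1 at the top call) only makes
-- the recursion on the Int g total — with 0 ≤ g it is never exhausted.
def pvUtilA : Nat → Int → Int → Int → Int → Int → List (List Int)
  | 0, _, _, _, _, _ => []
  | fuel+1, total_sum, n, g, start, actual =>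
    if g = 0 then (if total_sum = 0 then [[]] else [])
    else
      (PySem.List.pyRange start (min 700 (PySem.Int.floordiv total_sum g) + 1) 1).foldl
        (fun particiones i =>
          if i ≤ actual then
            particiones ++ (pvUtilA fuel (total_sum - i) n (g - 1) i actual).map (fun p => i :: p)
          else particiones) []

def generar_subgrupos_iguales (n : Int) (g : Int) : List (List Int) :=
  let total_sum := PySem.Int.floordiv ((PySem.List.pyRange 1 (n + 1) 1).sum * g) n
  pvUtilA (g.toNat + 1) total_sum n g 1 700

-- ===== PORT B =====
-- one round of Source B's comprehension: expand every state (rem, lo, pref) by its next part i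
def pvStepB (k : Int) (states : List (Int × Int × List Int)) : List (Int × Int × List Int) :=
  states.flatMap (fun s =>
    (PySem.List.pyRange s.2.1 (min 700 (PySem.Int.floordiv s.1 k) + 1) 1).map
      (fun i => (s.1 - i, i, s.2.2 ++ [i])))

-- Source B's while loop; the Nat fuel (g.toNat at the top call) only makes it total — the loop runs
-- at most g rounds since k counts down from g and the guard needs 0 < k.
def pvLoopB : Nat → Int → List (Int × Int × List Int) → List (Int × Int × List Int)
  | 0, _, states => states
  | fuel+1, k, states =>
    if 0 < k ∧ states ≠ [] then pvLoopB fuel (k - 1) (pvStepB k states) else states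

def generar_subgrupos_iguales_alt (n : Int) (g : Int) : List (List Int) :=
  let total_sum := PySem.Int.floordiv ((PySem.List.pyRange 1 (n + 1) 1).sum * g) n
  ((pvLoopB g.toNat g [(total_sum, 1, [])]).filter (fun s => s.1 = 0)).map (fun s => s.2.2)

-- ===== PRECONDITION & SPEC =====
-- Pre_ excludes: n = 0, where A raises ZeroDivisionError; g < 0, where A recurses without bound
-- (RecursionError) for n ≥ 1 and is outside the natural domain (for n < 0 it returns [] through a
-- vacuously empty loop over a negative part count, an accidental corner where B returns [[]]);
-- and g > 900 with n ≥ 1, where A's recursion depth g exceeds CPython's recursion limit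
-- (RecursionError near depth 1000).
def Pre_generar_subgrupos_iguales (n : Int) (g : Int) : Prop :=
  n ≠ 0 ∧ 0 ≤ g ∧ (g ≤ 900 ∨ n < 0)
instance (n : Int) (g : Int) : Decidable (Pre_generar_subgrupos_iguales n g) := by
  unfold Pre_generar_subgrupos_iguales; infer_instance

def pvWitness_generar_subgrupos_iguales : Int × Int := (4, 2)

def Spec_generar_subgrupos_iguales (n : Int) (g : Int) (out : List (List Int)) : Prop :=
  out = generar_subgrupos_iguales_alt n g
instance (n : Int) (g : Int) (out : List (List Int)) : Decidable (Spec_generar_subgrupos_iguales n g out) := by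
  unfold Spec_generar_subgrupos_iguales; infer_instance

-- ===== CLAIM (what is proved, stated in full; the proofs are below) =====
def Claim_equal_generar_subgrupos_iguales : Prop := ∀ (n : Int) (g : Int), Dom_generar_subgrupos_iguales n g → Pre_generar_subgrupos_iguales n g → Spec_generar_subgrupos_iguales n g (generar_subgrupos_iguales n g)

-- ===== LEMMAS AND PROOFS =====

-- one expansion round of B absorbed into one unfolding of A's recursion, per state
lemma pv_state_step (n : Int) (j : Nat) (s : Int × Int × List Int) :
    (PySem.List.pyRange s.2.1 (min 700 (PySem.Int.floordiv s.1 ((j : Int) + 1)) + 1) 1).flatMap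
        (fun i => (pvUtilA (j + 1) (s.1 - i) n (j : Int) i 700).map (fun p => (s.2.2 ++ [i]) ++ p))
      = (pvUtilA (j + 1 + 1) s.1 n ((j : Int) + 1) s.2.1 700).map (fun p => s.2.2 ++ p) := by
  conv_rhs => rw [pvUtilA]
  rw [if_neg (by omega)]
  rw [PySem.List.foldl_congr_mem' _ _
      (fun acc i => acc ++ (pvUtilA (j + 1) (s.1 - i) n ((j : Int) + 1 - 1) i 700).map (fun p => i :: p)) _
      (by
        intro x hx acc
        have hm := (PySem.List.mem_pyRange_one).1 hx
        simp only [if_pos (show x ≤ (700 : Int) by omega)])]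
  rw [PySem.List.foldl_append_eq_flatMap]
  simp only [List.nil_append, List.map_flatMap, List.map_map]
  have hj : ((j : Int) + 1 - 1) = (j : Int) := by ring
  rw [hj]
  congr 1
  funext i
  congr 1
  funext p
  simp [Function.comp]

-- collecting the finished states of B's level loop yields A's recursive enumeration: each state
-- contributes its prefix prepended to A's partitions of its remaining sum into j parts
lemma pv_collect_loop (n : Int) : ∀ (j : Nat) (states : List (Int × Int × List Int)),
    ((pvLoopB j (j : Int) states).filter (fun s => s.1 = 0)).map (fun s => s.2.2)
      = states.flatMap (fun s => (pvUtilA (j + 1) s.1 n (j : Int) s.2.1 700).map (fun p => s.2.2 ++ p)) := by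
  intro j
  induction j with
  | zero =>
    intro states
    induction states with
    | nil => simp [pvLoopB]
    | cons s ss ih =>
      simp only [pvLoopB] at ih ⊢
      simp only [List.flatMap_cons, List.filter_cons]
      by_cases h : s.1 = 0 <;> simp [pvUtilA, h, ih]
  | succ j ih =>
    intro states
    rcases eq_or_ne states [] with rfl | hne
    · simp [pvLoopB]
    · have hstep : pvLoopB (j + 1) ((j + 1 : Nat) : Int) states
          = pvLoopB j ((j : Nat) : Int) (pvStepB ((j + 1 : Nat) : Int) states) := by
        simp only [pvLoopB]
        rw [if_pos ⟨by push_cast; omega, hne⟩]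
        norm_num
      rw [hstep, ih, pvStepB, List.flatMap_assoc]
      push_cast
      congr 1
      funext s
      rw [List.flatMap_map]
      exact pv_state_step n j s

-- ===== VERDICT (by name: the statement is the Claim_ definition above) =====
theorem generar_subgrupos_iguales_spec : Claim_equal_generar_subgrupos_iguales := by
  intro n g hdom hpre
  obtain ⟨hn, hg, -⟩ := hpre
  obtain ⟨j, rfl⟩ : ∃ j : Nat, g = (j : Int) := ⟨g.toNat, (Int.toNat_of_nonneg hg).symm⟩
  show generar_subgrupos_iguales n j = generar_subgrupos_iguales_alt n j
  unfold generar_subgrupos_iguales generar_subgrupos_iguales_alt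
  simp only [Int.toNat_natCast]
  rw [pv_collect_loop n j]
  simp
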